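-- pv_equiv track=rewrite | github.com/eric-s-s/dice-tables | dicetables/tools/indexedvalues.py | make_start_index_and_list
-- ===== SOURCE A (Python) =====
-- def make_start_index_and_list(sorted_tuple_list):
--     start_val = sorted_tuple_list[0][0]
--     end_val = sorted_tuple_list[-1][0]
--     out_list = [0] * (end_val - start_val + 1)
--     for index, value in sorted_tuple_list:
--         list_index = index - start_val
--         out_list[list_index] = value
--     return start_val, out_list
-- ===== SOURCE B (Python) =====
-- def make_start_index_and_list(sorted_tuple_list):
--     start_val = sorted_tuple_list[0][0]
--     end_val = sorted_tuple_list[-1][0]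
--     values = dict(sorted_tuple_list)
--     return start_val, [values.get(i, 0) for i in range(start_val, end_val + 1)]
-- ===== Notes on version B (the rewrite author's own statement) =====
-- stated objective: idiomatic
-- what changed: A scatters the sparse pairs into a preallocated zero list at computed offsets; B builds a dict from the pairs once and gathers with d.get(i, 0) over the full contiguous range(start, end+1). Pre_ excludes the empty list (IndexError) and lists with an index outside the first..last bracket, where A's negative-index wraparound write is an implementation artefact.
-- outside the precondition, e.g. on make_start_index_and_list([(2, 5), (0, 9), (1, 1), (4, 8)]): A returns (2, [5, 9, 8]), B returns (2, [5, 0, 8]); on make_start_index_and_list([]): A raises IndexError, B raises IndexError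
import Mathlib
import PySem

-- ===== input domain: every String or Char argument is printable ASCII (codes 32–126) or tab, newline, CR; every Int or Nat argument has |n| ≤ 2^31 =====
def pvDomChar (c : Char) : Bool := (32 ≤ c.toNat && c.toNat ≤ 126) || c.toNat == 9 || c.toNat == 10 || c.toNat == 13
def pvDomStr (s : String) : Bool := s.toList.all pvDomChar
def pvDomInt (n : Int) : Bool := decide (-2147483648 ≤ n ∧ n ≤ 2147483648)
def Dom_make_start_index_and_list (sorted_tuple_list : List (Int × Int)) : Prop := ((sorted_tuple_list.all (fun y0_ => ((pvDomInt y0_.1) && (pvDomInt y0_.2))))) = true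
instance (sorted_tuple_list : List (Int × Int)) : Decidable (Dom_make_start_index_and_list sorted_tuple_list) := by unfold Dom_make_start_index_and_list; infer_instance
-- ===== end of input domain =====

-- B replaces A's scatter loop (preallocated zero list written at computed offsets) by a dict built
-- from the pairs once and a gather `d.get(i, 0)` over the full contiguous index range (idiomatic).

-- ===== PORT A =====
def make_start_index_and_list (sorted_tuple_list : List (Int × Int)) : Int × List Int :=
  -- (0, []) stands for the IndexError Python raises on []; unreachable under Pre_
  (PySem.List.pyGet? sorted_tuple_list 0).elim (0, []) fun p0 =>
    (PySem.List.pyGet? sorted_tuple_list (-1)).elim (0, []) fun plast =>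
      let start_val := p0.1
      let end_val := plast.1
      let out_list : List Int := List.replicate (end_val - start_val + 1).toNat 0
      let out_list := sorted_tuple_list.foldl
        (fun acc p => PySem.List.pySetD acc (p.1 - start_val) p.2) out_list
      (start_val, out_list)

-- ===== PORT B =====
def make_start_index_and_list_alt (sorted_tuple_list : List (Int × Int)) : Int × List Int :=
  match PySem.List.pyGet? sorted_tuple_list 0, PySem.List.pyGet? sorted_tuple_list (-1) with
  | some p0, some plast =>
    let start_val := p0.1
    let end_val := plast.1
    let values : PySem.Dict Int Int :=
      sorted_tuple_list.foldl (fun d p => d.insert p.1 p.2) PySem.Dict.empty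
    (start_val, (PySem.List.pyRange start_val (end_val + 1) 1).map (fun i => values.getD i 0))
  | _, _ => (0, [])  -- unreachable under Pre_: Python raises IndexError on []

-- ===== PRECONDITION & SPEC =====
-- Pre_: a NONEMPTY list whose every index lies between the first and the last index (true of any
-- sorted list, the function's named contract).  On [] the Python A raises IndexError; with an index
-- outside that bracket A either raises IndexError or writes through a negative-index wraparound,
-- an artefact of its implementation (see the cite in claim.json).
def Pre_make_start_index_and_list (sorted_tuple_list : List (Int × Int)) : Prop :=
  sorted_tuple_list ≠ [] ∧ ∀ p ∈ sorted_tuple_list,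
    sorted_tuple_list.headI.1 ≤ p.1 ∧ p.1 ≤ sorted_tuple_list.getLastI.1
instance (sorted_tuple_list : List (Int × Int)) : Decidable (Pre_make_start_index_and_list sorted_tuple_list) := by unfold Pre_make_start_index_and_list; infer_instance

def pvWitness_make_start_index_and_list : (List (Int × Int)) := [(-1, 4), (1, 2), (1, 3), (4, -7)]

def Spec_make_start_index_and_list (sorted_tuple_list : List (Int × Int)) (out : Int × List Int) : Prop := out = make_start_index_and_list_alt sorted_tuple_list
instance (sorted_tuple_list : List (Int × Int)) (out : Int × List Int) : Decidable (Spec_make_start_index_and_list sorted_tuple_list out) := by unfold Spec_make_start_index_and_list; infer_instance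

-- ===== CLAIM (what is proved, stated in full; the proofs are below) =====
def Claim_equal_make_start_index_and_list : Prop := ∀ (sorted_tuple_list : List (Int × Int)), Dom_make_start_index_and_list sorted_tuple_list → Pre_make_start_index_and_list sorted_tuple_list → Spec_make_start_index_and_list sorted_tuple_list (make_start_index_and_list sorted_tuple_list)

-- ===== LEMMAS AND PROOFS =====

-- Invariant connecting A's scatter fold with B's dict fold: if accumulator list and dict agree
-- positionally (acc[j] = d.get(start+j, 0)) and all remaining indices fit, the folds stay in step.
theorem pv_fold_rel (start : Int) (pairs : List (Int × Int)) :
    ∀ (acc : List Int) (d : PySem.Dict Int Int),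
    (∀ p ∈ pairs, start ≤ p.1 ∧ p.1 < start + acc.length) →
    (∀ j : Nat, j < acc.length → acc.getD j 0 = d.getD (start + j) 0) →
    (pairs.foldl (fun a p => PySem.List.pySetD a (p.1 - start) p.2) acc).length = acc.length ∧
    ∀ j : Nat, j < acc.length →
      (pairs.foldl (fun a p => PySem.List.pySetD a (p.1 - start) p.2) acc).getD j 0
        = (pairs.foldl (fun d p => d.insert p.1 p.2) d).getD (start + j) 0 := by
  induction pairs with
  | nil => intro acc d _ hrel; exact ⟨rfl, hrel⟩
  | cons p t ih =>
    intro acc d hbound hrel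
    have hb := hbound p (by simp)
    have hnn : (0:Int) ≤ p.1 - start := by omega
    have hacc : PySem.List.pySetD acc (p.1 - start) p.2 = acc.set (p.1 - start).toNat p.2 :=
      PySem.List.pySetD_of_nonneg _ _ hnn
    have hlen : (acc.set (p.1 - start).toNat p.2).length = acc.length := by simp
    have hrel' : ∀ j : Nat, j < acc.length →
        (acc.set (p.1 - start).toNat p.2).getD j 0 = (d.insert p.1 p.2).getD (start + j) 0 := by
      intro j hj
      rw [PySem.Dict.getD_insert]
      by_cases hcase : j = (p.1 - start).toNat
      · have heq : start + (j : Int) = p.1 := by omega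
        rw [if_pos heq, hcase, List.getD_eq_getElem?_getD, List.getElem?_set_self',
          List.getElem?_eq_getElem (by omega : (p.1 - start).toNat < acc.length)]
        rfl
      · have hne2 : ¬ (start + (j : Int) = p.1) := by omega
        rw [if_neg hne2, List.getD_eq_getElem?_getD,
          List.getElem?_set_ne (by omega), ← List.getD_eq_getElem?_getD]
        exact hrel j hj
    have hmain := ih (acc.set (p.1 - start).toNat p.2) (d.insert p.1 p.2)
      (by intro q hq; have := hbound q (List.mem_cons_of_mem _ hq); simp only [hlen]; omega)
      (fun j hj => hrel' j (hlen ▸ hj))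
    simp only [List.foldl_cons, hacc]
    exact ⟨by rw [hmain.1, hlen], fun j hj => hmain.2 j (hlen ▸ hj)⟩

-- ===== VERDICT (by name: the statement is the Claim_ definition above) =====
theorem make_start_index_and_list_spec : Claim_equal_make_start_index_and_list := by
  intro l _ hpre
  rcases hpre with ⟨hne, hbr⟩
  unfold Spec_make_start_index_and_list make_start_index_and_list make_start_index_and_list_alt
  have h0 : PySem.List.pyGet? l 0 = some (l.head hne) := by
    rw [PySem.List.pyGet?_zero, ← List.head?_eq_getElem?, List.head?_eq_some_head]
  have hm1 : PySem.List.pyGet? l (-1) = some (l.getLast hne) := by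
    rw [PySem.List.pyGet?_neg_one, List.getLast?_eq_some_getLast]
  rw [h0, hm1]
  simp only
  set start := (l.head hne).1 with hstart
  set endv := (l.getLast hne).1 with hendv
  have hbounds : ∀ p ∈ l, start ≤ p.1 ∧ p.1 ≤ endv := by
    intro p hp
    have := hbr p hp
    have hh : l.headI = l.head hne := by cases l with
      | nil => simp at hne
      | cons a t => rfl
    rwa [hh, List.getLastI_eq_getLast?_getD, List.getLast?_eq_some_getLast hne,
      Option.getD_some] at this
  have hse : start ≤ endv := (hbounds (l.head hne) (List.head_mem hne)).2
  set n : Nat := (endv - start + 1).toNat with hn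
  have hnlen : (List.replicate n (0:Int)).length = n := by simp
  have hrel := pv_fold_rel start l (List.replicate n 0) PySem.Dict.empty
    (by intro p hp; have := hbounds p hp; simp only [hnlen]; omega)
    (by intro j hj; simp [List.getD_eq_getElem?_getD, PySem.Dict.getD_empty])
  refine congrArg (Prod.mk start) ?_
  apply List.ext_getElem
  · rw [hrel.1, hnlen]
    simp [PySem.List.length_pyRange_one]; omega
  · intro j h1 h2
    have hjn : j < n := by rw [hrel.1, hnlen] at h1; exact h1
    have hA := hrel.2 j (by simpa [hnlen] using hjn)
    have hgA : (l.foldl (fun a p => PySem.List.pySetD a (p.1 - start) p.2)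
        (List.replicate n 0))[j] = (l.foldl (fun a p => PySem.List.pySetD a (p.1 - start) p.2)
        (List.replicate n 0)).getD j 0 := by
      rw [List.getD_eq_getElem?_getD, List.getElem?_eq_getElem h1]; rfl
    have hrange : (PySem.List.pyRange start (endv + 1) 1)[j]'(by
        simp [PySem.List.length_pyRange_one]; omega) = start + j :=
      PySem.List.getElem_pyRange_one _ _ _ _
    rw [hgA, hA, List.getElem_map, hrange]
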